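-- pv_equiv track=rewrite | github.com/Athira-L-I/parsons-ai-tutor | backend/services/isnap_features.py | _max_consecutive_failures
-- ===== SOURCE A (Python) =====
-- from typing import List, Dict
--
-- def _max_consecutive_failures(events: List[Dict]) -> int:
--     """Maximum consecutive attempts without progress"""
--     max_streak = 0
--     current_streak = 0
--     last_ast = None
--
--     for event in events:
--         current_ast = event['ast']
--
--         # No progress
--         if current_ast == last_ast and event['response_type'] != 'HINT_REQUEST':
--             current_streak += 1
--             max_streak = max(max_streak, current_streak)
--         else:
--             current_streak = 0
--
--         last_ast = current_ast
--
--     return max_streak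
-- ===== SOURCE B (Python) =====
-- def _max_consecutive_failures(events):
--     """Maximum consecutive attempts without progress"""
--     # Pass 1: flag each event as "no progress" (ast unchanged and not a hint request)
--     flags = []
--     prev = None
--     for e in events:
--         a = e['ast']
--         flags.append(a == prev and e['response_type'] != 'HINT_REQUEST')
--         prev = a
--     # Pass 2: longest run of True flags, jumping over whole runs
--     best = 0
--     i = 0
--     n = len(flags)
--     while i < n:
--         if flags[i]:
--             j = i + 1
--             while j < n and flags[j]:
--                 j += 1
--             best = max(best, j - i)
--             i = j
--         else:
--             i += 1
--     return best
-- ===== Notes on version B (the rewrite author's own statement) =====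
-- stated objective: alternative
-- what changed: Replaces A's single fused scan maintaining a running streak counter with two passes: first build a boolean no-progress flag per event (short-circuiting so event['response_type'] is read exactly when A reads it), then find the longest run of True flags by jumping run-to-run with two indices.
import Mathlib
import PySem

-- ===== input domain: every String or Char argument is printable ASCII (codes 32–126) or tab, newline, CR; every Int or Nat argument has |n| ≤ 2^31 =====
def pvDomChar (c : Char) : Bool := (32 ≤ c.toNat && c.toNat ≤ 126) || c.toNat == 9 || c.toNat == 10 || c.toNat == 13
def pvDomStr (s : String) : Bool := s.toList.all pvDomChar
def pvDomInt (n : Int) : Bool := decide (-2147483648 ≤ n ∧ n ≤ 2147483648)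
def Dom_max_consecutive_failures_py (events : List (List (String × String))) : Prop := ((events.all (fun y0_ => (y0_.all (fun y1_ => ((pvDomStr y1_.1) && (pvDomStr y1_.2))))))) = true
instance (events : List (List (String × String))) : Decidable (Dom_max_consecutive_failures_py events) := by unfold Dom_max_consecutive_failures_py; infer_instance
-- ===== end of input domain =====

-- B replaces A's fused running-streak scan by a flag-building pass plus a run-jumping
-- longest-run pass; same cost, different decomposition (objective: alternative).

-- first-match association-list lookup (Python dict access; none = KeyError)
def pvLookup? (d : List (String × String)) (k : String) : Option String :=
  (d.find? (fun p => p.1 == k)).map (·.2)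

def pvLookupD (d : List (String × String)) (k : String) : String :=
  (pvLookup? d k).getD ""

-- ===== PORT A =====
-- A's loop state: (max_streak, current_streak, last_ast)
def pvStepA (st : Int × Int × Option String) (event : List (String × String)) :
    Int × Int × Option String :=
  let currentAst := pvLookupD event "ast"
  if (st.2.2 == some currentAst) && !(pvLookupD event "response_type" == "HINT_REQUEST") then
    (max st.1 (st.2.1 + 1), st.2.1 + 1, some currentAst)
  else
    (st.1, 0, some currentAst)

def max_consecutive_failures_py (events : List (List (String × String))) : Int :=
  (events.foldl pvStepA (0, 0, none)).1

-- ===== PORT B =====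
-- pass 1: the "no progress" flag of each event (short-circuit preserved value-wise)
def pvFlags : Option String → List (List (String × String)) → List Bool
  | _, [] => []
  | prev, e :: rest =>
    let a := pvLookupD e "ast"
    ((prev == some a) && !(pvLookupD e "response_type" == "HINT_REQUEST")) :: pvFlags (some a) rest

-- pass 2: longest run of true flags, jumping whole runs (Source B's i/j while loops)
def pvMaxRun : List Bool → Int
  | [] => 0
  | false :: fs => pvMaxRun fs
  | true :: fs =>
    max (1 + ((fs.takeWhile id).length : Int)) (pvMaxRun (fs.dropWhile id))
termination_by l => l.length
decreasing_by
  all_goals (have h2 := List.length_dropWhile_le (p := id) (l := fs); simp at h2 ⊢; try omega)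

def max_consecutive_failures_py_alt (events : List (List (String × String))) : Int :=
  pvMaxRun (pvFlags none events)

-- ===== PRECONDITION & SPEC =====
-- Pre_ excludes exactly the inputs where Python A raises KeyError: some event lacks
-- the 'ast' key, or an event whose ast equals the previous event's ast lacks 'response_type'.
def pvPreAux : Option String → List (List (String × String)) → Bool
  | _, [] => true
  | prev, e :: rest =>
    match pvLookup? e "ast" with
    | none => false
    | some a =>
      (!(prev == some a) || (pvLookup? e "response_type").isSome) && pvPreAux (some a) rest

def Pre_max_consecutive_failures_py (events : List (List (String × String))) : Prop :=
  pvPreAux none events = true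

instance (events : List (List (String × String))) : Decidable (Pre_max_consecutive_failures_py events) := by
  unfold Pre_max_consecutive_failures_py; infer_instance

def pvWitness_max_consecutive_failures_py : List (List (String × String)) :=
  [[("ast", "x")], [("ast", "x"), ("response_type", "SUBMIT")]]

def Spec_max_consecutive_failures_py (events : List (List (String × String))) (out : Int) : Prop := out = max_consecutive_failures_py_alt events
instance (events : List (List (String × String))) (out : Int) : Decidable (Spec_max_consecutive_failures_py events out) := by unfold Spec_max_consecutive_failures_py; infer_instance

-- ===== CLAIM (what is proved, stated in full; the proofs are below) =====
def Claim_equal_max_consecutive_failures_py : Prop := ∀ (events : List (List (String × String))), Dom_max_consecutive_failures_py events → Pre_max_consecutive_failures_py events → Spec_max_consecutive_failures_py events (max_consecutive_failures_py events)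

-- ===== LEMMAS AND PROOFS =====

-- right-recursive reference scan: max streak reachable with current streak c
def pvMRW : Int → List Bool → Int
  | c, [] => c
  | c, true :: fs => pvMRW (c + 1) fs
  | c, false :: fs => max c (pvMRW 0 fs)

theorem pvMRW_ge (fs : List Bool) : ∀ c : Int, c ≤ pvMRW c fs := by
  induction fs with
  | nil => intro c; simp [pvMRW]
  | cons b fs ih =>
    intro c
    cases b
    · simp [pvMRW]
    · simpa [pvMRW] using le_trans (by omega) (ih (c + 1))

theorem pvMaxRun_nonneg (fs : List Bool) : 0 ≤ pvMaxRun fs := by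
  induction fs using pvMaxRun.induct with
  | case1 => simp [pvMaxRun]
  | case2 fs ih => simpa [pvMaxRun] using ih
  | case3 fs ih =>
    simp [pvMaxRun]
    right
    exact ih

-- unfolding pvMaxRun across one maximal true-run
theorem pvMaxRun_split (fs : List Bool) :
    pvMaxRun fs = max ((fs.takeWhile id).length : Int) (pvMaxRun (fs.dropWhile id)) := by
  cases fs with
  | nil => simp [pvMaxRun]
  | cons b fs =>
    cases b
    · simp [pvMaxRun, List.takeWhile, List.dropWhile, id]
      exact pvMaxRun_nonneg fs
    · simp [pvMaxRun, List.takeWhile, List.dropWhile, id]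
      congr 1
      omega

theorem pvMRW_eq_maxRun (fs : List Bool) :
    ∀ c : Int, 0 ≤ c →
      pvMRW c fs = max (c + ((fs.takeWhile id).length : Int)) (pvMaxRun (fs.dropWhile id)) := by
  induction fs with
  | nil => intro c hc; simp [pvMRW, pvMaxRun]; omega
  | cons b fs ih =>
    intro c hc
    cases b
    · have h := ih 0 le_rfl
      have hs := pvMaxRun_split fs
      simp [pvMRW, List.takeWhile, List.dropWhile, id, pvMaxRun]
      rw [h, hs]
      norm_num
    · have h := ih (c + 1) (by omega)
      simp [pvMRW, List.takeWhile, List.dropWhile, id]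
      rw [h]
      congr 1
      omega

-- A's fold over events equals the reference scan over B's flags
theorem foldA_eq_mrw (events : List (List (String × String))) :
    ∀ (prev : Option String) (m c : Int), 0 ≤ c → c ≤ m →
      (events.foldl pvStepA (m, c, prev)).1 = max m (pvMRW c (pvFlags prev events)) := by
  induction events with
  | nil => intro prev m c hc hcm; simp [pvFlags, pvMRW]; omega
  | cons e rest ih =>
    intro prev m c hc hcm
    simp only [List.foldl, pvFlags]
    cases hb : (prev == some (pvLookupD e "ast")) && !(pvLookupD e "response_type" == "HINT_REQUEST")
    · rw [show pvStepA (m, c, prev) e = (m, 0, some (pvLookupD e "ast")) by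
        simp [pvStepA, hb]]
      rw [ih _ m 0 le_rfl (by omega)]
      simp [pvMRW]
      have := pvMRW_ge (pvFlags (some (pvLookupD e "ast")) rest) 0
      omega
    · rw [show pvStepA (m, c, prev) e = (max m (c + 1), c + 1, some (pvLookupD e "ast")) by
        simp [pvStepA, hb]]
      rw [ih _ (max m (c + 1)) (c + 1) (by omega) (le_max_right _ _)]
      simp [pvMRW]
      have := pvMRW_ge (pvFlags (some (pvLookupD e "ast")) rest) (c + 1)
      omega

-- ===== VERDICT (by name: the statement is the Claim_ definition above) =====
theorem max_consecutive_failures_py_spec : Claim_equal_max_consecutive_failures_py := by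
  intro events _ _
  unfold Spec_max_consecutive_failures_py max_consecutive_failures_py max_consecutive_failures_py_alt
  rw [foldA_eq_mrw events none 0 0 le_rfl le_rfl,
      pvMRW_eq_maxRun (pvFlags none events) 0 le_rfl,
      pvMaxRun_split (pvFlags none events)]
  have h1 : (0 : Int) ≤ (((pvFlags none events).takeWhile id).length : Int) := by positivity
  have h2 := pvMaxRun_nonneg ((pvFlags none events).dropWhile id)
  omega
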